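-- pv_equiv track=rewrite | github.com/Aggrathon/MLusic | song.py | track_lengths
-- ===== SOURCE A (Python) =====
-- def track_lengths(track):
--     start = 0
--     end = 0
--     coverage = 0
--     tone_length = 0
--     for n in track:
--         if n[0] > end:
--             coverage += end-start
--             start = n[0]
--             end = n[0] + n[-1]
--         else:
--             new_end = n[0] + n[-1]
--             if new_end > end:
--                 end = new_end
--         tone_length += n[-1]
--     coverage += end-start
--     return coverage, tone_length, end - track[0][0]
-- ===== SOURCE B (Python) =====
-- def track_lengths(track):
--     tone_length = sum(n[-1] for n in track)
--     # prefix scan: ends[i] = reach after processing the first i notes (ends[0] = 0)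
--     ends = [0]
--     for n in track:
--         e, ne = ends[-1], n[0] + n[-1]
--         ends.append(ne if n[0] > e or ne > e else e)
--     # note i opens a new segment exactly when it starts past the reach so far
--     breaks = [i for i in range(len(track)) if track[i][0] > ends[i]]
--     starts = [0] + [track[i][0] for i in breaks]
--     closes = [ends[i] for i in breaks] + [ends[len(track)]]
--     coverage = sum(c - s for s, c in zip(starts, closes))
--     return coverage, tone_length, ends[len(track)] - track[0][0]
-- ===== Notes on version B (the rewrite author's own statement) =====
-- stated objective: alternative
-- what changed: B is a staged prefix-scan decomposition: it first materialises the list of prefix 'reach' values, then detects segment boundaries as the indices whose note starts past the prefix reach, and finally computes coverage as a zip-sum over the boundary-derived starts/closes arrays, instead of A's single loop over four scalar accumulators with branching merge logic.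
import Mathlib
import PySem

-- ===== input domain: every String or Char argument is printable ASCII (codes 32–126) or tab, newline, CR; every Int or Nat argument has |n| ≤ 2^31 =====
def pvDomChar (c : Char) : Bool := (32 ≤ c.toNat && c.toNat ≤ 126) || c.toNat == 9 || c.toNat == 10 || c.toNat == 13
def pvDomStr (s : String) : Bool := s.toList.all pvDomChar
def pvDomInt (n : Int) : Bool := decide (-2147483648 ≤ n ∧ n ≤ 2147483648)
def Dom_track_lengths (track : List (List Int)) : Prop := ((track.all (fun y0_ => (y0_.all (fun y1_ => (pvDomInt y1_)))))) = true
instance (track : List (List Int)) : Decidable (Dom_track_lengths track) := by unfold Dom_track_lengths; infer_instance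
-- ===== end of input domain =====

-- B replaces A's four-scalar-accumulator loop by a staged prefix-scan: a list of prefix reach values, boundary indices detected from it, and a zip-sum for coverage; same cost, return value proved equal.

-- ===== PORT A =====
-- A's loop over state (start, end, coverage, tone_length); n[0] / n[-1] via pyGet? (getD 0 is unreachable under Pre_: sublists are nonempty)
def aStep (st : Int × Int × Int × Int) (n : List Int) : Int × Int × Int × Int :=
  let s := (PySem.List.pyGet? n 0).getD 0
  let l := (PySem.List.pyGet? n (-1)).getD 0
  let (start, e, cov, tone) := st
  if s > e then (s, s + l, cov + (e - start), tone + l)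
  else
    let newEnd := s + l
    if newEnd > e then (start, newEnd, cov, tone + l)
    else (start, e, cov, tone + l)

def track_lengths (track : List (List Int)) : Int × Int × Int :=
  let st := track.foldl aStep (0, 0, 0, 0)
  let (start, e, cov, tone) := st
  (cov + (e - start), tone, e - (PySem.List.pyGet? ((PySem.List.pyGet? track 0).getD []) 0).getD 0)

-- ===== PORT B =====
-- Source B's helpers: n[0] and n[-1] of a note (defaults unreachable under Pre_)
def noteS (n : List Int) : Int := (PySem.List.pyGet? n 0).getD 0
def noteL (n : List Int) : Int := (PySem.List.pyGet? n (-1)).getD 0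

-- Source B's `ends` list: built by appending, reading ends[-1]
def bEnds (track : List (List Int)) : List Int :=
  track.foldl (fun acc n =>
    let e := acc.getLastD 0
    let ne := noteS n + noteL n
    acc ++ [if noteS n > e ∨ ne > e then ne else e]) [0]

-- Source B's `breaks` comprehension over range(len(track))
def bBreaks (track : List (List Int)) : List Nat :=
  (List.range track.length).filter (fun i => noteS (track.getD i []) > (bEnds track).getD i 0)

def bStarts (track : List (List Int)) : List Int :=
  0 :: (bBreaks track).map (fun i => noteS (track.getD i []))

def bCloses (track : List (List Int)) : List Int :=
  (bBreaks track).map (fun i => (bEnds track).getD i 0) ++ [(bEnds track).getD track.length 0]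

def track_lengths_alt (track : List (List Int)) : Int × Int × Int :=
  let tone := (track.map noteL).sum
  let cov := (((bStarts track).zip (bCloses track)).map (fun p => p.2 - p.1)).sum
  (cov, tone, (bEnds track).getD track.length 0 - noteS (track.getD 0 []))

-- ===== PRECONDITION & SPEC =====
-- Pre_ excludes exactly the inputs where the Python raises IndexError: an empty track (track[0]) or a track containing an empty note (n[0]/n[-1]).
def Pre_track_lengths (track : List (List Int)) : Prop :=
  track ≠ [] ∧ ∀ n ∈ track, n ≠ []
instance (track : List (List Int)) : Decidable (Pre_track_lengths track) := by unfold Pre_track_lengths; infer_instance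

def pvWitness_track_lengths : List (List Int) := [[0, 4], [2, 3]]

def Spec_track_lengths (track : List (List Int)) (out : Int × Int × Int) : Prop := out = track_lengths_alt track
instance (track : List (List Int)) (out : Int × Int × Int) : Decidable (Spec_track_lengths track out) := by unfold Spec_track_lengths; infer_instance

-- ===== CLAIM (what is proved, stated in full; the proofs are below) =====
def Claim_equal_track_lengths : Prop := ∀ (track : List (List Int)), Dom_track_lengths track → Pre_track_lengths track → Spec_track_lengths track (track_lengths track)

-- ===== LEMMAS AND PROOFS =====

theorem getD_snoc_lt {α : Type} (l : List α) (x d : α) (i : Nat) (h : i < l.length) :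
    (l ++ [x]).getD i d = l.getD i d := by
  simp [List.getD_eq_getElem?_getD, List.getElem?_append_left h]

theorem getD_snoc_self {α : Type} (l : List α) (x d : α) : (l ++ [x]).getD l.length d = x := by
  simp [List.getD_eq_getElem?_getD]

theorem bEnds_length (ns : List (List Int)) : (bEnds ns).length = ns.length + 1 := by
  induction ns using List.reverseRecOn with
  | nil => rfl
  | append_singleton ns n ih => simp [bEnds, List.foldl_append] at ih ⊢; omega

theorem bEnds_snoc (ns : List (List Int)) (n : List Int) :
    bEnds (ns ++ [n]) =
      bEnds ns ++ [if noteS n > (bEnds ns).getD ns.length 0 ∨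
                      noteS n + noteL n > (bEnds ns).getD ns.length 0
                   then noteS n + noteL n else (bEnds ns).getD ns.length 0] := by
  have hlast : (bEnds ns).getLastD 0 = (bEnds ns).getD ns.length 0 := by
    have h := bEnds_length ns
    induction ns using List.reverseRecOn with
    | nil => rfl
    | append_singleton ms m _ =>
        rcases List.eq_nil_or_concat (bEnds (ms ++ [m])) with h0 | ⟨l', a, h0⟩
        · rw [h0] at h; simp at h
        · rw [List.concat_eq_append] at h0
          rw [h0] at h ⊢
          have : l'.length = (ms ++ [m]).length := by simp at h ⊢; omega
          rw [List.getLastD_concat, ← this, getD_snoc_self]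
  simp only [bEnds, List.foldl_append, List.foldl_cons, List.foldl_nil]
  rw [show (List.foldl _ [0] ns : List Int) = bEnds ns from rfl, hlast]

theorem mem_bBreaks_lt (ns : List (List Int)) (i : Nat) (h : i ∈ bBreaks ns) : i < ns.length :=
  List.mem_range.mp (List.mem_of_mem_filter h)

theorem bBreaks_snoc (ns : List (List Int)) (n : List Int) :
    bBreaks (ns ++ [n]) =
      bBreaks ns ++ (if noteS n > (bEnds ns).getD ns.length 0 then [ns.length] else []) := by
  unfold bBreaks
  have hlen : (ns ++ [n]).length = ns.length + 1 := by simp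
  rw [hlen, List.range_succ, List.filter_append]
  congr 1
  · apply List.filter_congr
    intro i hi
    have hi' : i < ns.length := List.mem_range.mp hi
    rw [bEnds_snoc, getD_snoc_lt ns n [] i hi',
        getD_snoc_lt (bEnds ns) _ 0 i (by rw [bEnds_length]; omega)]
  · rw [bEnds_snoc]
    simp only [List.filter_cons, List.filter_nil]
    rw [getD_snoc_self ns n [],
        getD_snoc_lt (bEnds ns) _ 0 ns.length (by rw [bEnds_length]; omega)]
    by_cases h : noteS n > (bEnds ns).getD ns.length 0 <;> simp [h]

theorem bStarts_snoc (ns : List (List Int)) (n : List Int) :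
    bStarts (ns ++ [n]) =
      bStarts ns ++ (if noteS n > (bEnds ns).getD ns.length 0 then [noteS n] else []) := by
  unfold bStarts
  rw [bBreaks_snoc, List.map_append]
  have hmap : (bBreaks ns).map (fun i => noteS ((ns ++ [n]).getD i [])) =
      (bBreaks ns).map (fun i => noteS (ns.getD i [])) :=
    List.map_congr_left (fun i hi => by rw [getD_snoc_lt _ _ _ _ (mem_bBreaks_lt ns i hi)])
  rw [hmap]
  by_cases h : noteS n > (bEnds ns).getD ns.length 0
  · rw [if_pos h, if_pos h]
    simp only [List.map_cons, List.map_nil]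
    rw [getD_snoc_self ns n []]
    simp
  · rw [if_neg h, if_neg h]
    simp

theorem closes_map_snoc (ns : List (List Int)) (n : List Int) :
    (bBreaks ns).map (fun i => (bEnds (ns ++ [n])).getD i 0) =
      (bBreaks ns).map (fun i => (bEnds ns).getD i 0) :=
  List.map_congr_left (fun i hi => by
    rw [bEnds_snoc, getD_snoc_lt _ _ _ _ (by have := mem_bBreaks_lt ns i hi; rw [bEnds_length]; omega)])

theorem ends_snoc_last (ns : List (List Int)) (n : List Int) :
    (bEnds (ns ++ [n])).getD (ns ++ [n]).length 0 =
      (if noteS n > (bEnds ns).getD ns.length 0 ∨ noteS n + noteL n > (bEnds ns).getD ns.length 0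
       then noteS n + noteL n else (bEnds ns).getD ns.length 0) := by
  rw [bEnds_snoc]
  have h : (ns ++ [n]).length = (bEnds ns).length := by rw [bEnds_length]; simp
  rw [h, getD_snoc_self]

theorem bCloses_snoc_pos (ns : List (List Int)) (n : List Int)
    (h : noteS n > (bEnds ns).getD ns.length 0) :
    bCloses (ns ++ [n]) = bCloses ns ++ [noteS n + noteL n] := by
  unfold bCloses
  rw [bBreaks_snoc, if_pos h, List.map_append, closes_map_snoc, ends_snoc_last,
      if_pos (Or.inl h)]
  have : ([ns.length] : List Nat).map (fun i => (bEnds (ns ++ [n])).getD i 0)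
      = [(bEnds ns).getD ns.length 0] := by
    simp only [List.map_cons, List.map_nil]
    rw [bEnds_snoc, getD_snoc_lt _ _ _ _ (by rw [bEnds_length]; omega)]
  rw [this]

theorem bCloses_snoc_neg (ns : List (List Int)) (n : List Int)
    (h : ¬ noteS n > (bEnds ns).getD ns.length 0) :
    bCloses (ns ++ [n]) =
      (bBreaks ns).map (fun i => (bEnds ns).getD i 0) ++
        [if noteS n + noteL n > (bEnds ns).getD ns.length 0
         then noteS n + noteL n else (bEnds ns).getD ns.length 0] := by
  unfold bCloses
  rw [bBreaks_snoc, if_neg h, List.append_nil, closes_map_snoc, ends_snoc_last]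
  by_cases hc : noteS n + noteL n > (bEnds ns).getD ns.length 0
  · rw [if_pos (Or.inr hc), if_pos hc]
  · rw [if_neg (by tauto), if_neg hc]

theorem starts_closes_len (ns : List (List Int)) : (bStarts ns).length = (bCloses ns).length := by
  simp [bStarts, bCloses]

theorem starts_map_len (ns : List (List Int)) :
    (bStarts ns).length = ((bBreaks ns).map (fun i => (bEnds ns).getD i 0)).length + 1 := by
  simp [bStarts]

theorem zipsum_snoc (xs ys : List Int) (a b : Int) (h : xs.length = ys.length) :
    (((xs ++ [a]).zip (ys ++ [b])).map (fun p : Int × Int => p.2 - p.1)).sum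
      = ((xs.zip ys).map (fun p : Int × Int => p.2 - p.1)).sum + (b - a) := by
  rw [List.zip_append h]; simp

theorem zipsum_snoc_right (xs ys : List Int) (b : Int) (h : xs.length = ys.length + 1) :
    ((xs.zip (ys ++ [b])).map (fun p : Int × Int => p.2 - p.1)).sum
      = ((xs.dropLast.zip ys).map (fun p : Int × Int => p.2 - p.1)).sum + (b - xs.getLastD 0) := by
  have hne : xs ≠ [] := by intro h0; rw [h0] at h; simp at h
  conv_lhs => rw [← List.dropLast_concat_getLast hne]
  rw [List.zip_append (by simp [h])]
  simp [List.getLastD_eq_getLast?, List.getLast?_eq_some_getLast hne]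

-- Main invariant tying B's staged arrays to A's scalar state, by snoc induction
theorem key_invariant (ns : List (List Int)) :
    (bEnds ns).getD ns.length 0 = (ns.foldl aStep (0,0,0,0)).2.1
  ∧ (bStarts ns).getLastD 0 = (ns.foldl aStep (0,0,0,0)).1
  ∧ (((bStarts ns).zip (bCloses ns)).map (fun p : Int × Int => p.2 - p.1)).sum
      = (ns.foldl aStep (0,0,0,0)).2.2.1 + ((ns.foldl aStep (0,0,0,0)).2.1 - (ns.foldl aStep (0,0,0,0)).1)
  ∧ (ns.foldl aStep (0,0,0,0)).2.2.2 = (ns.map noteL).sum := by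
  induction ns using List.reverseRecOn with
  | nil => exact ⟨rfl, rfl, by simp [bStarts, bCloses, bBreaks, bEnds], rfl⟩
  | append_singleton ns n ih =>
    obtain ⟨h1, h2, h3, h4⟩ := ih
    have hfold : (ns ++ [n]).foldl aStep (0,0,0,0) = aStep (ns.foldl aStep (0,0,0,0)) n := by
      simp [List.foldl_append]
    by_cases hb : noteS n > (ns.foldl aStep (0,0,0,0)).2.1
    · -- new segment
      have hb' : noteS n > (bEnds ns).getD ns.length 0 := by rw [h1]; exact hb
      have hstep : aStep (ns.foldl aStep (0,0,0,0)) n =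
          (noteS n, noteS n + noteL n,
           (ns.foldl aStep (0,0,0,0)).2.2.1 + ((ns.foldl aStep (0,0,0,0)).2.1 - (ns.foldl aStep (0,0,0,0)).1),
           (ns.foldl aStep (0,0,0,0)).2.2.2 + noteL n) := by
        rcases hq : ns.foldl aStep (0,0,0,0) with ⟨st, e, cov, tone⟩
        rw [hq] at hb
        simp only [aStep, noteS, noteL] at hb ⊢
        first | rfl | rw [if_pos hb]
      refine ⟨?_, ?_, ?_, ?_⟩
      · rw [ends_snoc_last, if_pos (Or.inl hb'), hfold, hstep]
      · rw [bStarts_snoc, if_pos hb', List.getLastD_concat, hfold, hstep]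
      · rw [bStarts_snoc, if_pos hb', bCloses_snoc_pos ns n hb',
            zipsum_snoc _ _ _ _ (starts_closes_len ns), h3, hfold, hstep]
      · rw [hfold, hstep]
        simp [h4]
    · -- extend / absorb
      have hb' : ¬ noteS n > (bEnds ns).getD ns.length 0 := by rw [h1]; exact hb
      have hstep : aStep (ns.foldl aStep (0,0,0,0)) n =
          ((ns.foldl aStep (0,0,0,0)).1,
           (if noteS n + noteL n > (ns.foldl aStep (0,0,0,0)).2.1
            then noteS n + noteL n else (ns.foldl aStep (0,0,0,0)).2.1),
           (ns.foldl aStep (0,0,0,0)).2.2.1,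
           (ns.foldl aStep (0,0,0,0)).2.2.2 + noteL n) := by
        rcases hq : ns.foldl aStep (0,0,0,0) with ⟨st, e, cov, tone⟩
        rw [hq] at hb
        simp only [aStep, noteS, noteL] at hb ⊢
        first
          | rfl
          | (rw [if_neg hb]
             by_cases hc : ((PySem.List.pyGet? n 0).getD 0 + (PySem.List.pyGet? n (-1)).getD 0 : Int) > e
             · rw [if_pos hc, if_pos hc]
             · rw [if_neg hc, if_neg hc])
      have hcond : (noteS n + noteL n > (bEnds ns).getD ns.length 0)
          ↔ (noteS n + noteL n > (ns.foldl aStep (0,0,0,0)).2.1) := by rw [h1]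
      refine ⟨?_, ?_, ?_, ?_⟩
      · rw [ends_snoc_last, hfold, hstep]
        simp only [h1]
        by_cases hc : noteS n + noteL n > (ns.foldl aStep (0,0,0,0)).2.1
        · simp [hb, hc]
        · simp [hb, hc]
      · rw [bStarts_snoc, if_neg hb', List.append_nil, hfold, hstep]
        simpa using h2
      · rw [bStarts_snoc, if_neg hb', List.append_nil, bCloses_snoc_neg ns n hb',
            zipsum_snoc_right _ _ _ (starts_map_len ns), hfold, hstep]
        dsimp only
        have hold : (((bStarts ns).zip (bCloses ns)).map (fun p : Int × Int => p.2 - p.1)).sum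
            = (((bStarts ns).dropLast.zip ((bBreaks ns).map (fun i => (bEnds ns).getD i 0))).map
                (fun p : Int × Int => p.2 - p.1)).sum
              + ((bEnds ns).getD ns.length 0 - (bStarts ns).getLastD 0) := by
          have : bCloses ns = (bBreaks ns).map (fun i => (bEnds ns).getD i 0)
              ++ [(bEnds ns).getD ns.length 0] := rfl
          rw [this, zipsum_snoc_right _ _ _ (starts_map_len ns)]
        rw [h3, h1, h2] at hold
        rw [h1, h2]
        generalize (if noteS n + noteL n > (ns.foldl aStep (0,0,0,0)).2.1
            then noteS n + noteL n else (ns.foldl aStep (0,0,0,0)).2.1) = X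
        linarith [hold]
      · rw [hfold, hstep]
        simp [h4]

-- ===== VERDICT (by name: the statement is the Claim_ definition above) =====
theorem track_lengths_spec : Claim_equal_track_lengths := by
  intro track _ _
  unfold Spec_track_lengths track_lengths track_lengths_alt
  obtain ⟨e3, e4, e5, e6⟩ := key_invariant track
  simp only []
  rw [e3, e5, e6]
  simp only [Prod.mk.injEq]
  refine ⟨by trivial, ?_, ?_⟩
  · trivial
  · cases track with
    | nil => simp [noteS, PySem.List.pyGet?]
    | cons h t => simp [noteS]
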